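-- pv_equiv track=rewrite | github.com/HayatoBr/ArquivoOcultoShorts_Project | core/images/sdwebui_client.py | _pick_sampler
-- ===== SOURCE A (Python) =====
-- from typing import Any, Dict, List, Optional, Tuple
--
-- def _pick_sampler(available: List[str], preferred: str) -> str:
--     if not available:
--         return preferred
--     for n in available:
--         if n.lower() == preferred.lower():
--             return n
--     for cand in ["Euler a", "Euler", "DPM++ 2M", "DPM++ 2M Karras", "UniPC"]:
--         for n in available:
--             if n.lower() == cand.lower():
--                 return n
--     return available[0]
-- ===== SOURCE B (Python) =====
-- def _pick_sampler(available, preferred):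
--     if not available:
--         return preferred
--     lows = [p.lower() for p in [preferred, "Euler a", "Euler",
--                                 "DPM++ 2M", "DPM++ 2M Karras", "UniPC"]]
--     def rank(name):
--         s = name.lower()
--         for i, p in enumerate(lows):
--             if p == s:
--                 return i
--         return len(lows)
--     return min(available, key=rank)
-- ===== Notes on version B (the rewrite author's own statement) =====
-- stated objective: faster
-- what changed: Replaced A's layered re-scans of `available` (one scan for the preferred name, then one scan per fallback candidate, each re-lowering strings per comparison) with a single stable min over `available` keyed by each name's rank in a once-lowered preference list.
import Mathlib
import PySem

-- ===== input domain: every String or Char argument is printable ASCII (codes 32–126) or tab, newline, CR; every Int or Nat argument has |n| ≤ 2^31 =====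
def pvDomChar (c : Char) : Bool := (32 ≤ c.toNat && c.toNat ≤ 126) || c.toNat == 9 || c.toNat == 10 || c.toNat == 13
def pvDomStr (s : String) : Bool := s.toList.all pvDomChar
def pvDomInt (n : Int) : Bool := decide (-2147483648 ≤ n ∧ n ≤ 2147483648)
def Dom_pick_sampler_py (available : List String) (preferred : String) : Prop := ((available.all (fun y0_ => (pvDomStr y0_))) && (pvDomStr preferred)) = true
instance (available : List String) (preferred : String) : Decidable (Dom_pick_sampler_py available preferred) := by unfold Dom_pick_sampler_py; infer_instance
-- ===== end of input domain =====

-- B replaces A's layered scans (one pass per candidate name) with a single stable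
-- min over `available` keyed by each name's rank in the preference list (alternative
-- decomposition, same return value).

-- ===== PORT A =====

-- the inner `for n in available: if n.lower() == cand.lower(): return n` loops,
-- iterated over the candidate list
def pickScanCands (cands : List String) (available : List String) : Option String :=
  match cands with
  | [] => none
  | c :: cs =>
    match available.find? (fun n => PySem.Str.lower n == PySem.Str.lower c) with
    | some n => some n
    | none => pickScanCands cs available

def pick_sampler_py (available : List String) (preferred : String) : String :=
  match available with
  | [] => preferred          -- `if not available: return preferred`
  | h :: _ =>
    match available.find? (fun n => PySem.Str.lower n == PySem.Str.lower preferred) with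
    | some n => n
    | none =>
      match pickScanCands ["Euler a", "Euler", "DPM++ 2M", "DPM++ 2M Karras", "UniPC"] available with
      | some n => n
      | none => h            -- `return available[0]`

-- ===== PORT B =====

-- `for i, p in enumerate(lows): if p == s: return i` then `return len(lows)`
def pickRankGo (total : Int) (s : String) : List (Int × String) → Int
  | [] => total
  | (i, p) :: t => if p == s then i else pickRankGo total s t

def pick_sampler_py_alt (available : List String) (preferred : String) : String :=
  match available with
  | [] => preferred          -- `if not available: return preferred`
  | h :: _ =>
    let lows := [preferred, "Euler a", "Euler", "DPM++ 2M", "DPM++ 2M Karras", "UniPC"].map PySem.Str.lower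
    let rank := fun (name : String) =>
      pickRankGo (lows.length : Int) (PySem.Str.lower name) (PySem.List.enumerate lows 0)
    (PySem.List.min? available rank).getD h   -- min(available, key=rank); nonempty, so never the default

-- ===== PRECONDITION & SPEC =====
def Spec_pick_sampler_py (available : List String) (preferred : String) (out : String) : Prop := out = pick_sampler_py_alt available preferred
instance (available : List String) (preferred : String) (out : String) : Decidable (Spec_pick_sampler_py available preferred out) := by unfold Spec_pick_sampler_py; infer_instance

-- ===== CLAIM (what is proved, stated in full; the proofs are below) =====
def Claim_equal_pick_sampler_py : Prop := ∀ (available : List String) (preferred : String), Dom_pick_sampler_py available preferred → Spec_pick_sampler_py available preferred (pick_sampler_py available preferred)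

-- ===== LEMMAS AND PROOFS =====

-- index of the first occurrence of s in L, L.length if absent
def pickIdx : List String → String → Nat
  | [], _ => 0
  | c :: cs, s => if c = s then 0 else pickIdx cs s + 1

-- proof-side form of A's search: layered find? over the (lowered) preference list
def pickScanLow (P : List String) (available : List String) : Option String :=
  match P with
  | [] => none
  | c :: cs =>
    match available.find? (fun n => PySem.Str.lower n == c) with
    | some n => some n
    | none => pickScanLow cs available

lemma pickIdx_of_not_mem (L : List String) (s : String) (h : s ∉ L) :
    pickIdx L s = L.length := by
  induction L with
  | nil => rfl
  | cons c cs ih =>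
    simp only [List.mem_cons, not_or] at h
    simp [pickIdx, Ne.symm h.1, ih h.2]

lemma pickRankGo_enum (L : List String) (s : String) (T : Int) (i : Int) :
    pickRankGo T s (PySem.List.enumerate L i) =
      if s ∈ L then i + (pickIdx L s : Int) else T := by
  induction L generalizing i with
  | nil => simp [pickRankGo, PySem.List.enumerate_nil]
  | cons c cs ih =>
    rw [PySem.List.enumerate_cons]
    by_cases hc : c = s
    · simp [pickRankGo, hc, pickIdx]
    · simp only [pickRankGo, beq_iff_eq, hc, if_false, ih]
      by_cases hm : s ∈ cs
      · simp only [List.mem_cons, hm, or_true, if_true, pickIdx, Ne.symm hc,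
          eq_comm, if_false]
        push_cast
        ring
      · simp [hm, Ne.symm hc, List.mem_cons]

-- the rank key computed by the B port is pickIdx of the lowered name
lemma pickRankGo_eq_idx (L : List String) (s : String) :
    pickRankGo (L.length : Int) s (PySem.List.enumerate L 0) = (pickIdx L s : Int) := by
  rw [pickRankGo_enum]
  by_cases hm : s ∈ L
  · simp [hm]
  · simp [hm, pickIdx_of_not_mem L s hm]

-- min? on a nonempty list is the running-minimum fold started at the head
lemma pickMin?_cons (key : String → Int) (h : String) (t : List String) :
    PySem.List.min? (h :: t) key =
      some (t.foldl (fun b n => if key n < key b then n else b) h) := by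
  induction t generalizing h with
  | nil => simp [PySem.List.min?, List.foldl]
  | cons n t ih =>
    have step : PySem.List.min? (h :: n :: t) key =
        PySem.List.min? ((if key n < key h then n else h) :: t) key := by
      simp only [PySem.List.min?, List.foldl]
      by_cases hc : key n < key h <;> simp [hc]
    rw [step, ih]
    simp only [List.foldl]

-- an Int-valued key that is a Nat cast compares like the Nat key
lemma pickFoldl_key_congr (kI : String → Int) (kN : String → Nat)
    (hk : ∀ y, kI y = (kN y : Int)) :
    ∀ (t : List String) (b : String),
      t.foldl (fun b n => if kI n < kI b then n else b) b =
      t.foldl (fun b n => if kN n < kN b then n else b) b := by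
  intro t b
  simp only [hk, Nat.cast_lt]

-- a head of minimal (zero) key is never replaced
lemma pickFoldl_zero (K : String → Nat) (b : String) (hb : K b = 0) :
    ∀ t : List String, t.foldl (fun b n => if K n < K b then n else b) b = b := by
  intro t
  induction t with
  | nil => rfl
  | cons n t ih => simpa [List.foldl, hb] using ih

-- the running minimum returns the FIRST element of zero key when one exists
lemma pickFoldl_firstzero (K : String → Nat) (p : String → Bool)
    (hp : ∀ y, p y = true ↔ K y = 0) :
    ∀ (t : List String) (b x : String), (b :: t).find? p = some x →
      t.foldl (fun b n => if K n < K b then n else b) b = x := by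
  intro t
  induction t with
  | nil =>
    intro b x hf
    cases hpb : p b with
    | true =>
      simp only [List.find?, hpb] at hf
      cases hf; rfl
    | false => simp [List.find?, hpb] at hf
  | cons n t ih =>
    intro b x hf
    cases hpb : p b with
    | true =>
      simp only [List.find?, hpb] at hf
      cases hf
      exact pickFoldl_zero K b ((hp b).1 hpb) _
    | false =>
      have hKb : K b ≠ 0 := fun h0 => by
        have := (hp b).2 h0; rw [hpb] at this; exact Bool.false_ne_true this
      simp only [List.find?, hpb] at hf
      cases hpn : p n with
      | true =>
        have hKn : K n = 0 := (hp n).1 hpn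
        simp only [hpn] at hf
        cases hf
        have hlt : K n < K b := by omega
        simp only [List.foldl, hlt, if_true]
        exact pickFoldl_zero K n hKn t
      | false =>
        simp only [hpn] at hf
        simp only [List.foldl]
        by_cases hc : K n < K b
        · simp only [hc, if_true]
          exact ih n x (by simp only [List.find?, hpn]; exact hf)
        · simp only [hc, if_false]
          exact ih b x (by simp only [List.find?, hpb]; exact hf)

-- replacing the key by a pointwise-equal one (on the visited elements) is harmless
lemma pickFoldl_congr_mem (k1 k2 : String → Nat) :
    ∀ (t : List String) (b : String), (∀ y ∈ b :: t, k1 y = k2 y) →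
      t.foldl (fun b n => if k1 n < k1 b then n else b) b =
      t.foldl (fun b n => if k2 n < k2 b then n else b) b := by
  intro t
  induction t with
  | nil => intro b _; rfl
  | cons n t ih =>
    intro b hmem
    have hb := hmem b (by simp)
    have hn := hmem n (by simp)
    simp only [List.foldl, hb, hn]
    by_cases hc : k2 n < k2 b
    · simp only [hc, if_true]
      exact ih n (fun y hy => hmem y (by simp only [List.mem_cons] at hy ⊢; tauto))
    · simp only [hc, if_false]
      exact ih b (fun y hy => hmem y (by simp only [List.mem_cons] at hy ⊢; tauto))

-- shifting every key by one does not change the running minimum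
lemma pickFoldl_succ (K : String → Nat) :
    ∀ (t : List String) (b : String),
      t.foldl (fun b n => if K n + 1 < K b + 1 then n else b) b =
      t.foldl (fun b n => if K n < K b then n else b) b := by
  intro t b
  simp only [Nat.add_lt_add_iff_right]

-- MAIN: the running minimum keyed by rank equals A's layered scan
lemma pickMain (h : String) (t : List String) :
    ∀ P : List String,
      t.foldl (fun b n =>
        if pickIdx P (PySem.Str.lower n) < pickIdx P (PySem.Str.lower b) then n else b) h =
      (pickScanLow P (h :: t)).getD h := by
  intro P
  induction P with
  | nil =>
    simp only [pickScanLow, Option.getD_none]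
    exact pickFoldl_zero (fun y => pickIdx [] (PySem.Str.lower y)) h rfl t
  | cons c cs ih =>
    have hp : ∀ y, ((fun n => PySem.Str.lower n == c) y = true) ↔
        (fun y => pickIdx (c :: cs) (PySem.Str.lower y)) y = 0 := by
      intro y
      by_cases hc : c = PySem.Str.lower y
      · simp [pickIdx, hc]
      · simp [pickIdx, hc, beq_iff_eq, Ne.symm hc]
    cases hf : (h :: t).find? (fun n => PySem.Str.lower n == c) with
    | some x =>
      simp only [pickScanLow, hf, Option.getD_some]
      exact pickFoldl_firstzero _ _ hp t h x hf
    | none =>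
      have hnone := List.find?_eq_none.1 hf
      have hmem : ∀ y ∈ h :: t,
          pickIdx (c :: cs) (PySem.Str.lower y) = pickIdx cs (PySem.Str.lower y) + 1 := by
        intro y hy
        have : ¬ (PySem.Str.lower y == c) = true := by
          simpa using hnone y hy
        simp only [beq_iff_eq] at this
        have hne : c ≠ PySem.Str.lower y := fun h' => this h'.symm
        simp [pickIdx, hne]
      calc t.foldl (fun b n =>
            if pickIdx (c :: cs) (PySem.Str.lower n) < pickIdx (c :: cs) (PySem.Str.lower b)
            then n else b) h
          = t.foldl (fun b n =>
            if pickIdx cs (PySem.Str.lower n) + 1 < pickIdx cs (PySem.Str.lower b) + 1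
            then n else b) h :=
            pickFoldl_congr_mem _ _ t h hmem
        _ = t.foldl (fun b n =>
            if pickIdx cs (PySem.Str.lower n) < pickIdx cs (PySem.Str.lower b)
            then n else b) h := pickFoldl_succ _ t h
        _ = (pickScanLow cs (h :: t)).getD h := ih
        _ = (pickScanLow (c :: cs) (h :: t)).getD h := by
            simp [pickScanLow, hf]

lemma pickScanCands_eq (cands av : List String) :
    pickScanCands cands av = pickScanLow (cands.map PySem.Str.lower) av := by
  induction cands with
  | nil => rfl
  | cons c cs ih => simp only [pickScanCands, List.map, pickScanLow, ih]

-- ===== VERDICT (by name: the statement is the Claim_ definition above) =====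
theorem pick_sampler_py_spec : Claim_equal_pick_sampler_py := by
  intro available preferred _
  unfold Spec_pick_sampler_py
  cases available with
  | nil => rfl
  | cons h t =>
    show pick_sampler_py (h :: t) preferred = pick_sampler_py_alt (h :: t) preferred
    have hB : pick_sampler_py_alt (h :: t) preferred =
        (pickScanLow ([preferred, "Euler a", "Euler", "DPM++ 2M", "DPM++ 2M Karras",
          "UniPC"].map PySem.Str.lower) (h :: t)).getD h := by
      simp only [pick_sampler_py_alt]
      rw [pickMin?_cons]
      simp only [Option.getD_some]
      rw [pickFoldl_key_congr _
        (fun y => pickIdx ([preferred, "Euler a", "Euler", "DPM++ 2M", "DPM++ 2M Karras",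
          "UniPC"].map PySem.Str.lower) (PySem.Str.lower y))
        (fun y => pickRankGo_eq_idx _ (PySem.Str.lower y)) t h]
      exact pickMain h t _
    rw [hB]
    have hsplit : pickScanLow ([preferred, "Euler a", "Euler", "DPM++ 2M", "DPM++ 2M Karras",
          "UniPC"].map PySem.Str.lower) (h :: t)
        = match (h :: t).find? (fun n => PySem.Str.lower n == PySem.Str.lower preferred) with
          | some n => some n
          | none => pickScanLow (["Euler a", "Euler", "DPM++ 2M", "DPM++ 2M Karras",
              "UniPC"].map PySem.Str.lower) (h :: t) := rfl
    rw [hsplit]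
    simp only [pick_sampler_py, pickScanCands_eq]
    cases hf0 : (h :: t).find? (fun n => PySem.Str.lower n == PySem.Str.lower preferred) with
    | some x => simp only [Option.getD_some]
    | none =>
      cases hf1 : pickScanLow (["Euler a", "Euler", "DPM++ 2M", "DPM++ 2M Karras",
          "UniPC"].map PySem.Str.lower) (h :: t) with
      | some x => simp only [Option.getD_some]
      | none => simp only [Option.getD_none]
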